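-- pv_equiv track=rewrite | github.com/keemeoow/rb-multiview-calibration-pose-estimation | src/Obj_Step2_multiview_pose_estimation.py | parse_frame_search_spec
-- ===== SOURCE A (Python) =====
-- from typing import Dict, List, Optional, Tuple
--
-- def parse_frame_search_spec(spec: Optional[str], available_ids: list) -> list:
--     if not available_ids:
--         return []
--     if spec is None or str(spec).strip() == "":
--         return available_ids
--
--     wanted_int = set()
--     wanted_raw = set()
--     for token in str(spec).split(","):
--         token = token.strip()
--         if not token:
--             continue
--         if "-" in token:
--             a, b = token.split("-", 1)
--             a = a.strip()
--             b = b.strip()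
--             if (not a.isdigit()) or (not b.isdigit()):
--                 continue
--             ia, ib = int(a), int(b)
--             lo, hi = min(ia, ib), max(ia, ib)
--             for i in range(lo, hi + 1):
--                 wanted_int.add(i)
--         else:
--             if token.isdigit():
--                 wanted_int.add(int(token))
--             else:
--                 wanted_raw.add(token)
--
--     filtered = []
--     for fid in available_ids:
--         if fid in wanted_raw:
--             filtered.append(fid)
--         elif fid.isdigit() and int(fid) in wanted_int:
--             filtered.append(fid)
--     return filtered
-- ===== SOURCE B (Python) =====
-- def parse_frame_search_spec(spec, available_ids):
--     if not available_ids: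
--         return []
--     if spec is None or str(spec).strip() == "":
--         return available_ids
--
--     raw = set()
--     intervals = []  # inclusive (lo, hi) pairs; ranges are kept as intervals, not expanded
--     for token in str(spec).split(","):
--         token = token.strip()
--         if not token:
--             continue
--         if "-" in token:
--             a, b = token.split("-", 1)
--             a, b = a.strip(), b.strip()
--             if a.isdigit() and b.isdigit():
--                 ia, ib = int(a), int(b)
--                 intervals.append((min(ia, ib), max(ia, ib)))
--         elif token.isdigit():
--             v = int(token)
--             intervals.append((v, v))
--         else:
--             raw.add(token)
--
--     def hit(fid):
--         if fid in raw:
--             return True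
--         if fid.isdigit():
--             v = int(fid)
--             return any(lo <= v <= hi for lo, hi in intervals)
--         return False
--
--     return [fid for fid in available_ids if hit(fid)]
-- ===== Notes on version B (the rewrite author's own statement) =====
-- stated objective: alternative
-- what changed: B stores each numeric range token as an inclusive (lo, hi) interval pair and tests each candidate id directly against the interval list, instead of A's expansion of every range into a set of all its integers.
import Mathlib
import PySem

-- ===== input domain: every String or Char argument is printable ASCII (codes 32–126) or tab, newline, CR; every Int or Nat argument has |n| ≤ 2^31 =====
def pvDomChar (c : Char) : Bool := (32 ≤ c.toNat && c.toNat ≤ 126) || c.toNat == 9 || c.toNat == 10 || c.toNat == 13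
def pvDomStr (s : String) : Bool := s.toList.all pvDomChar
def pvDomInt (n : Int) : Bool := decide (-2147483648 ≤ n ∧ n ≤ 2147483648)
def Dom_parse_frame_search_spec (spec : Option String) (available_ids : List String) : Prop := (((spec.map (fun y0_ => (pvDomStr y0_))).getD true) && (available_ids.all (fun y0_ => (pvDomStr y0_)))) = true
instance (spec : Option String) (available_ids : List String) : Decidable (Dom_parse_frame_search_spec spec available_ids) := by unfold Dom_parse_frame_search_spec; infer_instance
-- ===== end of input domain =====

-- B keeps numeric range tokens as inclusive (lo, hi) interval pairs and tests each id against
-- them directly, instead of A's expansion of every range into a set of integers (alternative algorithm).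

-- ===== PORT A =====
-- one iteration of A's token loop, updating (wanted_int, wanted_raw)
def pvAtok (st : PySem.Set Int × PySem.Set String) (token0 : String) :
    PySem.Set Int × PySem.Set String :=
  let token := PySem.Str.strip token0
  if token = "" then st
  else if PySem.Str.isIn "-" token then
    match PySem.Str.splitMax? token "-" 1 with
    | some [a0, b0] =>
        let a := PySem.Str.strip a0
        let b := PySem.Str.strip b0
        if !(PySem.Str.strIsdigit a) || !(PySem.Str.strIsdigit b) then st
        else
          let ia := (PySem.Int.ofStr? a).getD 0   -- exact: a.isdigit() ⇒ int(a) succeeds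
          let ib := (PySem.Int.ofStr? b).getD 0
          ((PySem.List.pyRange (min ia ib) (max ia ib + 1) 1).foldl PySem.Set.add st.1, st.2)
    | _ => st  -- unreachable: "-" in token ⇒ token.split("-", 1) yields exactly two pieces
  else if PySem.Str.strIsdigit token then
    (PySem.Set.add st.1 ((PySem.Int.ofStr? token).getD 0), st.2)
  else (st.1, PySem.Set.add st.2 token)

def parse_frame_search_spec (spec : Option String) (available_ids : List String) : List String :=
  if available_ids = [] then []
  else match spec with
  | none => available_ids
  | some s =>
    if PySem.Str.strip s = "" then available_ids
    else
      let st := (((PySem.Str.split? s ",").getD [])).foldl pvAtok (PySem.Set.empty, PySem.Set.empty)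
      available_ids.foldl (fun acc fid =>
        if PySem.Set.contains st.2 fid then acc ++ [fid]
        else if PySem.Str.strIsdigit fid &&
             PySem.Set.contains st.1 ((PySem.Int.ofStr? fid).getD 0) then acc ++ [fid]
        else acc) []

-- ===== PORT B =====
-- one iteration of B's token loop, updating (raw, intervals)
def pvBtok (st : PySem.Set String × List (Int × Int)) (token0 : String) :
    PySem.Set String × List (Int × Int) :=
  let token := PySem.Str.strip token0
  if token = "" then st
  else if PySem.Str.isIn "-" token then
    match PySem.Str.splitMax? token "-" 1 with
    | some [a0, b0] =>
        let a := PySem.Str.strip a0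
        let b := PySem.Str.strip b0
        if PySem.Str.strIsdigit a && PySem.Str.strIsdigit b then
          let ia := (PySem.Int.ofStr? a).getD 0   -- exact: a.isdigit() ⇒ int(a) succeeds
          let ib := (PySem.Int.ofStr? b).getD 0
          (st.1, st.2 ++ [(min ia ib, max ia ib)])
        else st
    | _ => st  -- unreachable: "-" in token ⇒ token.split("-", 1) yields exactly two pieces
  else if PySem.Str.strIsdigit token then
    let v := (PySem.Int.ofStr? token).getD 0
    (st.1, st.2 ++ [(v, v)])
  else (PySem.Set.add st.1 token, st.2)

-- B's hit(fid)
def pvHit (raw : PySem.Set String) (intervals : List (Int × Int)) (fid : String) : Bool :=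
  if PySem.Set.contains raw fid then true
  else if PySem.Str.strIsdigit fid then
    let v := (PySem.Int.ofStr? fid).getD 0
    intervals.any (fun p => decide (p.1 ≤ v) && decide (v ≤ p.2))
  else false

def parse_frame_search_spec_alt (spec : Option String) (available_ids : List String) : List String :=
  if available_ids = [] then []
  else match spec with
  | none => available_ids
  | some s =>
    if PySem.Str.strip s = "" then available_ids
    else
      let st := (((PySem.Str.split? s ",").getD [])).foldl pvBtok (PySem.Set.empty, [])
      available_ids.filter (pvHit st.1 st.2)

-- ===== PRECONDITION & SPEC =====
def Spec_parse_frame_search_spec (spec : Option String) (available_ids : List String) (out : List String) : Prop := out = parse_frame_search_spec_alt spec available_ids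
instance (spec : Option String) (available_ids : List String) (out : List String) : Decidable (Spec_parse_frame_search_spec spec available_ids out) := by unfold Spec_parse_frame_search_spec; infer_instance

-- ===== CLAIM (what is proved, stated in full; the proofs are below) =====
def Claim_equal_parse_frame_search_spec : Prop := ∀ (spec : Option String) (available_ids : List String), Dom_parse_frame_search_spec spec available_ids → Spec_parse_frame_search_spec spec available_ids (parse_frame_search_spec spec available_ids)

-- ===== LEMMAS AND PROOFS =====

-- membership after folding Set.add over a list
theorem mem_foldl_add_set {α : Type} [BEq α] [LawfulBEq α] (l : List α) (s : PySem.Set α) (v : α) :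
    v ∈ l.foldl PySem.Set.add s ↔ v ∈ s ∨ v ∈ l := by
  induction l generalizing s with
  | nil => simp
  | cons x t ih =>
      simp [List.foldl_cons, ih, PySem.Set.mem_add]
      tauto

-- the loop invariant: same raw set, and wanted_int membership ↔ some interval contains v
def pvInv (sInt : PySem.Set Int) (ivs : List (Int × Int)) : Prop :=
  ∀ v : Int, v ∈ sInt ↔ ∃ p ∈ ivs, p.1 ≤ v ∧ v ≤ p.2

-- invariant preservation at a single-number token and at a range token
theorem pvInv_digit (sInt : PySem.Set Int) (ivs : List (Int × Int)) (c : Int)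
    (h : pvInv sInt ivs) :
    pvInv (PySem.Set.add sInt c) (ivs ++ [(c, c)]) := by
  intro v
  rw [PySem.Set.mem_add]
  simp only [List.mem_append, List.mem_singleton]
  constructor
  · rintro (hv | hv)
    · obtain ⟨p, hp, hle⟩ := (h v).mp hv
      exact ⟨p, Or.inl hp, hle⟩
    · subst hv
      exact ⟨_, Or.inr rfl, le_refl _, le_refl _⟩
  · rintro ⟨p, hp | hp, hle⟩
    · exact Or.inl ((h v).mpr ⟨p, hp, hle⟩)
    · subst hp
      right
      have h1 : c ≤ v := hle.1
      have h2 : v ≤ c := hle.2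
      omega

theorem pvInv_range (sInt : PySem.Set Int) (ivs : List (Int × Int)) (lo hi : Int)
    (h : pvInv sInt ivs) :
    pvInv ((PySem.List.pyRange lo (hi + 1) 1).foldl PySem.Set.add sInt) (ivs ++ [(lo, hi)]) := by
  intro v
  rw [mem_foldl_add_set]
  simp only [List.mem_append, List.mem_singleton]
  constructor
  · rintro (hv | hv)
    · obtain ⟨p, hp, hle⟩ := (h v).mp hv
      exact ⟨p, Or.inl hp, hle⟩
    · rw [PySem.List.mem_pyRange_one] at hv
      refine ⟨_, Or.inr rfl, hv.1, by omega⟩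
  · rintro ⟨p, hp | hp, hle⟩
    · exact Or.inl ((h v).mpr ⟨p, hp, hle⟩)
    · subst hp
      right
      rw [PySem.List.mem_pyRange_one]
      have h1 : lo ≤ v := hle.1
      have h2 : v ≤ hi := hle.2
      omega

-- branch equations for A's token step
theorem pvAtok_empty (st : PySem.Set Int × PySem.Set String) (tok : String)
    (h0 : PySem.Str.strip tok = "") : pvAtok st tok = st := by
  unfold pvAtok; simp only [h0, if_true]

theorem pvAtok_range (sInt : PySem.Set Int) (sRaw : PySem.Set String) (tok a0 b0 : String)
    (h0 : ¬ PySem.Str.strip tok = "") (h1 : PySem.Str.isIn "-" (PySem.Str.strip tok) = true)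
    (hsp : PySem.Str.splitMax? (PySem.Str.strip tok) "-" 1 = some [a0, b0])
    (ha : PySem.Str.strIsdigit (PySem.Str.strip a0) = true)
    (hb : PySem.Str.strIsdigit (PySem.Str.strip b0) = true) :
    pvAtok (sInt, sRaw) tok =
      ((PySem.List.pyRange
          (min ((PySem.Int.ofStr? (PySem.Str.strip a0)).getD 0)
               ((PySem.Int.ofStr? (PySem.Str.strip b0)).getD 0))
          (max ((PySem.Int.ofStr? (PySem.Str.strip a0)).getD 0)
               ((PySem.Int.ofStr? (PySem.Str.strip b0)).getD 0) + 1) 1).foldl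
        PySem.Set.add sInt, sRaw) := by
  unfold pvAtok
  rw [if_neg h0, if_pos h1, hsp]
  simp only [ha, hb, Bool.not_true, Bool.or_self]
  simp

theorem pvAtok_range_skip (sInt : PySem.Set Int) (sRaw : PySem.Set String) (tok a0 b0 : String)
    (h0 : ¬ PySem.Str.strip tok = "") (h1 : PySem.Str.isIn "-" (PySem.Str.strip tok) = true)
    (hsp : PySem.Str.splitMax? (PySem.Str.strip tok) "-" 1 = some [a0, b0])
    (hc : PySem.Str.strIsdigit (PySem.Str.strip a0) = false ∨
          PySem.Str.strIsdigit (PySem.Str.strip b0) = false) :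
    pvAtok (sInt, sRaw) tok = (sInt, sRaw) := by
  unfold pvAtok
  rw [if_neg h0, if_pos h1, hsp]
  rcases hc with hc | hc <;>
    (simp only [PySem.Str.strIsdigit_eq, PySem.Str.toList_strip] at hc; simp [hc])

theorem pvAtok_digit (sInt : PySem.Set Int) (sRaw : PySem.Set String) (tok : String)
    (h0 : ¬ PySem.Str.strip tok = "") (h1 : PySem.Str.isIn "-" (PySem.Str.strip tok) = false)
    (h2 : PySem.Str.strIsdigit (PySem.Str.strip tok) = true) :
    pvAtok (sInt, sRaw) tok =
      (PySem.Set.add sInt ((PySem.Int.ofStr? (PySem.Str.strip tok)).getD 0), sRaw) := by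
  unfold pvAtok
  simp only [h0, if_false, h1, Bool.false_eq_true, h2, if_true]

theorem pvAtok_raw (sInt : PySem.Set Int) (sRaw : PySem.Set String) (tok : String)
    (h0 : ¬ PySem.Str.strip tok = "") (h1 : PySem.Str.isIn "-" (PySem.Str.strip tok) = false)
    (h2 : PySem.Str.strIsdigit (PySem.Str.strip tok) = false) :
    pvAtok (sInt, sRaw) tok = (sInt, PySem.Set.add sRaw (PySem.Str.strip tok)) := by
  unfold pvAtok
  simp only [h0, if_false, h1, h2, Bool.false_eq_true]

-- branch equations for B's token step
theorem pvBtok_empty (st : PySem.Set String × List (Int × Int)) (tok : String)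
    (h0 : PySem.Str.strip tok = "") : pvBtok st tok = st := by
  unfold pvBtok; simp only [h0, if_true]

theorem pvBtok_range (sRaw : PySem.Set String) (ivs : List (Int × Int)) (tok a0 b0 : String)
    (h0 : ¬ PySem.Str.strip tok = "") (h1 : PySem.Str.isIn "-" (PySem.Str.strip tok) = true)
    (hsp : PySem.Str.splitMax? (PySem.Str.strip tok) "-" 1 = some [a0, b0])
    (ha : PySem.Str.strIsdigit (PySem.Str.strip a0) = true)
    (hb : PySem.Str.strIsdigit (PySem.Str.strip b0) = true) :
    pvBtok (sRaw, ivs) tok =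
      (sRaw, ivs ++
        [(min ((PySem.Int.ofStr? (PySem.Str.strip a0)).getD 0)
              ((PySem.Int.ofStr? (PySem.Str.strip b0)).getD 0),
          max ((PySem.Int.ofStr? (PySem.Str.strip a0)).getD 0)
              ((PySem.Int.ofStr? (PySem.Str.strip b0)).getD 0))]) := by
  unfold pvBtok
  rw [if_neg h0, if_pos h1, hsp]
  simp only [ha, hb, Bool.and_self]
  simp

theorem pvBtok_range_skip (sRaw : PySem.Set String) (ivs : List (Int × Int)) (tok a0 b0 : String)
    (h0 : ¬ PySem.Str.strip tok = "") (h1 : PySem.Str.isIn "-" (PySem.Str.strip tok) = true)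
    (hsp : PySem.Str.splitMax? (PySem.Str.strip tok) "-" 1 = some [a0, b0])
    (hc : PySem.Str.strIsdigit (PySem.Str.strip a0) = false ∨
          PySem.Str.strIsdigit (PySem.Str.strip b0) = false) :
    pvBtok (sRaw, ivs) tok = (sRaw, ivs) := by
  unfold pvBtok
  rw [if_neg h0, if_pos h1, hsp]
  rcases hc with hc | hc <;>
    (simp only [PySem.Str.strIsdigit_eq, PySem.Str.toList_strip] at hc; simp [hc])

theorem pvBtok_digit (sRaw : PySem.Set String) (ivs : List (Int × Int)) (tok : String)
    (h0 : ¬ PySem.Str.strip tok = "") (h1 : PySem.Str.isIn "-" (PySem.Str.strip tok) = false)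
    (h2 : PySem.Str.strIsdigit (PySem.Str.strip tok) = true) :
    pvBtok (sRaw, ivs) tok =
      (sRaw, ivs ++ [((PySem.Int.ofStr? (PySem.Str.strip tok)).getD 0,
                      (PySem.Int.ofStr? (PySem.Str.strip tok)).getD 0)]) := by
  unfold pvBtok
  simp only [h0, if_false, h1, Bool.false_eq_true, h2, if_true]

theorem pvBtok_raw (sRaw : PySem.Set String) (ivs : List (Int × Int)) (tok : String)
    (h0 : ¬ PySem.Str.strip tok = "") (h1 : PySem.Str.isIn "-" (PySem.Str.strip tok) = false)
    (h2 : PySem.Str.strIsdigit (PySem.Str.strip tok) = false) :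
    pvBtok (sRaw, ivs) tok = (PySem.Set.add sRaw (PySem.Str.strip tok), ivs) := by
  unfold pvBtok
  simp only [h0, if_false, h1, h2, Bool.false_eq_true]

set_option maxHeartbeats 1000000 in
theorem pvStep (sInt : PySem.Set Int) (sRaw : PySem.Set String) (ivs : List (Int × Int))
    (tok : String) (h : pvInv sInt ivs) :
    (pvAtok (sInt, sRaw) tok).2 = (pvBtok (sRaw, ivs) tok).1 ∧
    pvInv (pvAtok (sInt, sRaw) tok).1 (pvBtok (sRaw, ivs) tok).2 := by
  by_cases h0 : PySem.Str.strip tok = ""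
  · rw [pvAtok_empty _ _ h0, pvBtok_empty _ _ h0]
    exact ⟨rfl, h⟩
  · by_cases h1 : PySem.Str.isIn "-" (PySem.Str.strip tok) = true
    · cases hsp : PySem.Str.splitMax? (PySem.Str.strip tok) "-" 1 with
      | none =>
        have eA : pvAtok (sInt, sRaw) tok = (sInt, sRaw) := by
          unfold pvAtok; rw [if_neg h0, if_pos h1, hsp]
        have eB : pvBtok (sRaw, ivs) tok = (sRaw, ivs) := by
          unfold pvBtok; rw [if_neg h0, if_pos h1, hsp]
        rw [eA, eB]; exact ⟨rfl, h⟩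
      | some l =>
        match l with
        | [] =>
          have eA : pvAtok (sInt, sRaw) tok = (sInt, sRaw) := by
            unfold pvAtok; rw [if_neg h0, if_pos h1, hsp]
          have eB : pvBtok (sRaw, ivs) tok = (sRaw, ivs) := by
            unfold pvBtok; rw [if_neg h0, if_pos h1, hsp]
          rw [eA, eB]; exact ⟨rfl, h⟩
        | [a0] =>
          have eA : pvAtok (sInt, sRaw) tok = (sInt, sRaw) := by
            unfold pvAtok; rw [if_neg h0, if_pos h1, hsp]
          have eB : pvBtok (sRaw, ivs) tok = (sRaw, ivs) := by
            unfold pvBtok; rw [if_neg h0, if_pos h1, hsp]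
          rw [eA, eB]; exact ⟨rfl, h⟩
        | a0 :: b0 :: c :: r =>
          have eA : pvAtok (sInt, sRaw) tok = (sInt, sRaw) := by
            unfold pvAtok; rw [if_neg h0, if_pos h1, hsp]
          have eB : pvBtok (sRaw, ivs) tok = (sRaw, ivs) := by
            unfold pvBtok; rw [if_neg h0, if_pos h1, hsp]
          rw [eA, eB]; exact ⟨rfl, h⟩
        | [a0, b0] =>
          by_cases hd : PySem.Str.strIsdigit (PySem.Str.strip a0) = true ∧
                        PySem.Str.strIsdigit (PySem.Str.strip b0) = true
          · rw [pvAtok_range sInt sRaw tok a0 b0 h0 h1 hsp hd.1 hd.2,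
                pvBtok_range sRaw ivs tok a0 b0 h0 h1 hsp hd.1 hd.2]
            generalize (PySem.Int.ofStr? (PySem.Str.strip a0)).getD 0 = ia
            generalize (PySem.Int.ofStr? (PySem.Str.strip b0)).getD 0 = ib
            exact ⟨rfl, pvInv_range sInt ivs _ _ h⟩
          · have hc : PySem.Str.strIsdigit (PySem.Str.strip a0) = false ∨
                      PySem.Str.strIsdigit (PySem.Str.strip b0) = false := by
              rcases Decidable.not_and_iff_or_not.mp hd with hh | hh
              · exact Or.inl (by simpa using hh)
              · exact Or.inr (by simpa using hh)
            rw [pvAtok_range_skip sInt sRaw tok a0 b0 h0 h1 hsp hc,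
                pvBtok_range_skip sRaw ivs tok a0 b0 h0 h1 hsp hc]
            exact ⟨rfl, h⟩
    · simp only [Bool.not_eq_true] at h1
      by_cases h2 : PySem.Str.strIsdigit (PySem.Str.strip tok) = true
      · rw [pvAtok_digit sInt sRaw tok h0 h1 h2, pvBtok_digit sRaw ivs tok h0 h1 h2]
        generalize (PySem.Int.ofStr? (PySem.Str.strip tok)).getD 0 = c
        exact ⟨rfl, pvInv_digit sInt ivs _ h⟩
      · simp only [Bool.not_eq_true] at h2
        rw [pvAtok_raw sInt sRaw tok h0 h1 h2, pvBtok_raw sRaw ivs tok h0 h1 h2]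
        exact ⟨rfl, h⟩

theorem pvFold (tokens : List String) (sInt : PySem.Set Int) (sRaw : PySem.Set String)
    (ivs : List (Int × Int)) (h : pvInv sInt ivs) :
    (tokens.foldl pvAtok (sInt, sRaw)).2 = (tokens.foldl pvBtok (sRaw, ivs)).1 ∧
    pvInv (tokens.foldl pvAtok (sInt, sRaw)).1 (tokens.foldl pvBtok (sRaw, ivs)).2 := by
  induction tokens generalizing sInt sRaw ivs with
  | nil => exact ⟨rfl, h⟩
  | cons t ts ih =>
      simp only [List.foldl_cons]
      obtain ⟨hr, hi⟩ := pvStep sInt sRaw ivs t h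
      have h2 := ih (pvAtok (sInt, sRaw) t).1 (pvAtok (sInt, sRaw) t).2
        (pvBtok (sRaw, ivs) t).2 hi
      simp only [Prod.mk.eta] at h2
      rw [hr] at h2
      simp only [Prod.mk.eta] at h2
      exact h2

-- the append-to-accumulator loop is a filter
theorem foldl_append_if_eq_filter {α : Type} (xs : List α) (p : α → Bool) (acc : List α) :
    xs.foldl (fun acc x => if p x then acc ++ [x] else acc) acc = acc ++ xs.filter p := by
  induction xs generalizing acc with
  | nil => simp
  | cons x t ih =>
      simp only [List.foldl_cons, List.filter_cons]
      by_cases hp : p x = true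
      · simp [hp, ih]
      · simp only [Bool.not_eq_true] at hp
        simp [hp, ih]

-- ===== VERDICT (by name: the statement is the Claim_ definition above) =====
theorem parse_frame_search_spec_spec : Claim_equal_parse_frame_search_spec := by
  unfold Claim_equal_parse_frame_search_spec Spec_parse_frame_search_spec
  intro spec ids _
  unfold parse_frame_search_spec parse_frame_search_spec_alt
  by_cases hids : ids = []
  · simp [hids]
  · simp only [hids, if_false]
    cases spec with
    | none => rfl
    | some s =>
      by_cases hs : PySem.Str.strip s = ""
      · simp [hs]
      · simp only [hs, if_false]
        obtain ⟨hr, hi⟩ := pvFold ((PySem.Str.split? s ",").getD []) PySem.Set.empty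
          PySem.Set.empty [] (by intro v; simp [PySem.Set.empty])
        set stA := ((PySem.Str.split? s ",").getD []).foldl pvAtok (PySem.Set.empty, PySem.Set.empty) with hstA
        set stB := ((PySem.Str.split? s ",").getD []).foldl pvBtok (PySem.Set.empty, []) with hstB
        have hx : ∀ v : Int, (v ∈ stA.1) ↔
            (stB.2.any (fun p => decide (p.1 ≤ v) && decide (v ≤ p.2)) = true) := by
          intro v
          rw [List.any_eq_true, hi v]
          constructor
          · rintro ⟨p, hp, hle⟩
            exact ⟨p, hp, by simp [hle.1, hle.2]⟩
          · rintro ⟨p, hp, hle⟩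
            simp only [Bool.and_eq_true, decide_eq_true_eq] at hle
            exact ⟨p, hp, hle⟩
        have hA : (fun (acc : List String) fid =>
              if PySem.Set.contains stA.2 fid then acc ++ [fid]
              else if PySem.Str.strIsdigit fid &&
                   PySem.Set.contains stA.1 ((PySem.Int.ofStr? fid).getD 0) then acc ++ [fid]
              else acc)
            = (fun (acc : List String) fid =>
              if pvHit stB.1 stB.2 fid then acc ++ [fid] else acc) := by
          funext acc fid
          unfold pvHit
          dsimp only
          rw [← hr]
          by_cases hraw : fid ∈ stA.2
          · have hc2 : PySem.Set.contains stA.2 fid = true :=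
              (PySem.Set.contains_iff _ _).mpr hraw
            rw [if_pos hc2, if_pos hc2, if_pos rfl]
          · have hc2 : PySem.Set.contains stA.2 fid = false :=
              Bool.eq_false_iff.mpr (fun hh => hraw ((PySem.Set.contains_iff _ _).mp hh))
            have hnraw : ¬ (PySem.Set.contains stA.2 fid = true) :=
              fun hh => hraw ((PySem.Set.contains_iff _ _).mp hh)
            by_cases hdg : PySem.Str.strIsdigit fid = true
            · have hxv : PySem.Set.contains stA.1 ((PySem.Int.ofStr? fid).getD 0) =
                  stB.2.any (fun p => decide (p.1 ≤ (PySem.Int.ofStr? fid).getD 0) &&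
                    decide ((PySem.Int.ofStr? fid).getD 0 ≤ p.2)) := by
                by_cases hm : (PySem.Int.ofStr? fid).getD 0 ∈ stA.1
                · rw [(PySem.Set.contains_iff _ _).mpr hm, (hx _).mp hm]
                · have c1 : PySem.Set.contains stA.1 ((PySem.Int.ofStr? fid).getD 0) = false :=
                    Bool.eq_false_iff.mpr (fun hh => hm ((PySem.Set.contains_iff _ _).mp hh))
                  have c2 : stB.2.any (fun p => decide (p.1 ≤ (PySem.Int.ofStr? fid).getD 0) &&
                      decide ((PySem.Int.ofStr? fid).getD 0 ≤ p.2)) = false :=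
                    Bool.eq_false_iff.mpr (fun hh => hm ((hx _).mpr hh))
                  rw [c1, c2]
              rw [if_neg hnraw, if_neg hnraw, if_pos hdg]
              have hcomb : (PySem.Str.strIsdigit fid &&
                  PySem.Set.contains stA.1 ((PySem.Int.ofStr? fid).getD 0)) =
                  stB.2.any (fun p => decide (p.1 ≤ (PySem.Int.ofStr? fid).getD 0) &&
                    decide ((PySem.Int.ofStr? fid).getD 0 ≤ p.2)) := by
                rw [hdg, hxv, Bool.true_and]
              rw [hcomb]
            · have hdg' : PySem.Str.strIsdigit fid = false := by
                simpa using hdg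
              rw [if_neg hnraw, if_neg hnraw, if_neg hdg]
              have hnc : ¬ ((PySem.Str.strIsdigit fid &&
                  PySem.Set.contains stA.1 ((PySem.Int.ofStr? fid).getD 0)) = true) := by
                rw [hdg']
                simp
              rw [if_neg hnc]
              rw [if_neg (by simp : ¬ ((false : Bool) = true))]
        rw [hA, foldl_append_if_eq_filter]
        simp
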